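-- pv_equiv track=rewrite | github.com/CanopyLang/compiler | extract_test_output.py | extract_js_from_failure
-- ===== SOURCE A (Python) =====
-- def extract_js_from_failure(text):
--     """Extract JavaScript content from test failure."""
--     # Look for the pattern where JS content is shown
--     lines = text.split('\n')
--
--     expected_js = None
--     actual_js = None
--
--     for i, line in enumerate(lines):
--         if 'expected:' in line and '"(function(scope)' in line:
--             # This line contains the expected JS
--             start = line.find('"(function(scope)')
--             if start != -1:
--                 js_content = line[start+1:]  # Remove opening quote
--
--                 # Look for the end quote, handling escaped quotes
--                 end_pos = find_closing_quote(js_content)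
--                 if end_pos != -1:
--                     expected_js = js_content[:end_pos]
--
--         elif ('but got:' in line or 'actual:' in line) and '"(function(scope)' in line:
--             # This line contains the actual JS
--             start = line.find('"(function(scope)')
--             if start != -1:
--                 js_content = line[start+1:]  # Remove opening quote
--
--                 # Look for the end quote
--                 end_pos = find_closing_quote(js_content)
--                 if end_pos != -1:
--                     actual_js = js_content[:end_pos]
--
--     return expected_js, actual_js
--
-- def find_closing_quote(text):
--     """Find the closing quote, handling escaped quotes."""
--     i = 0
--     while i < len(text):
--         if text[i] == '"' and (i == 0 or text[i-1] != '\\'):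
--             return i
--         i += 1
--     return -1
-- ===== SOURCE B (Python) =====
-- _MARKER = '"(function(scope)'
--
-- def _payload(line):
--     """Return the quoted JS payload of a line, or None."""
--     start = line.find(_MARKER)
--     if start == -1:
--         return None
--     out = []
--     prev = ''
--     for ch in line[start + 1:]:
--         if ch == '"' and prev != '\\':
--             return ''.join(out)
--         out.append(ch)
--         prev = ch
--     return None
--
-- def extract_js_from_failure(text):
--     """Extract JavaScript content from test failure."""
--     expected_js = None
--     actual_js = None
--     # scan lines back-to-front: the first hit from the end is A's last-wins value
--     for line in reversed(text.split('\n')):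
--         if expected_js is not None and actual_js is not None:
--             break
--         is_expected = 'expected:' in line
--         if not (is_expected or 'but got:' in line or 'actual:' in line):
--             continue
--         payload = _payload(line)
--         if payload is None:
--             continue
--         if is_expected:
--             if expected_js is None:
--                 expected_js = payload
--         elif actual_js is None:
--             actual_js = payload
--     return expected_js, actual_js
-- ===== Notes on version B (the rewrite author's own statement) =====
-- stated objective: alternative
-- what changed: Replaces A's forward line loop with last-assignment-wins overwriting plus an index-based while-loop closing-quote search by a reverse line scan that keeps the first successful hit per slot and exits early, with the payload cut out by a single prefix-collecting pass that carries the previous character instead of indexing.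
import Mathlib
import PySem

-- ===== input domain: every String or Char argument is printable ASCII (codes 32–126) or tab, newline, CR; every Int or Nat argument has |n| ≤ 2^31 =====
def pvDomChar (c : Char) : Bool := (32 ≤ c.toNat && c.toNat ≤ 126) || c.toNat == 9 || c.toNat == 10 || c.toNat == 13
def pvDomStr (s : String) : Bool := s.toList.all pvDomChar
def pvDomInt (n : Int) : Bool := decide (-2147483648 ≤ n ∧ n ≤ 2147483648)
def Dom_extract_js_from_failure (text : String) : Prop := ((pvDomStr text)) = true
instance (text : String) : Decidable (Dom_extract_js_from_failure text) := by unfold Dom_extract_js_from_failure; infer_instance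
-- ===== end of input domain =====

-- B replaces A's forward last-wins line scan and index-based closing-quote search by a reverse
-- first-wins scan with early exit and a prefix-collecting fold carrying the previous character
-- (objective: alternative decomposition, same result).

-- ===== PORT A =====

-- find_closing_quote: the while-loop over index i; text[i] / text[i-1] are only read with i in range
def fcqAux (cs : List Char) (i : Nat) : Int :=
  if h : i < cs.length then
    if cs[i] = '"' ∧ (i = 0 ∨ cs[i-1]! ≠ '\\') then (i : Int)
    else fcqAux cs (i+1)
  else -1
termination_by cs.length - i

def find_closing_quote (t : String) : Int := fcqAux t.toList 0

-- the body of A's for-loop (the enumerate index i is never used)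
def stepA (st : Option String × Option String) (line : String) : Option String × Option String :=
  if PySem.Str.isIn "expected:" line ∧ PySem.Str.isIn "\"(function(scope)" line then
    let start := PySem.Str.find line "\"(function(scope)"
    if start ≠ -1 then
      let js_content := PySem.Str.slice line (some (start + 1)) none
      let end_pos := find_closing_quote js_content
      if end_pos ≠ -1 then (some (PySem.Str.slice js_content none (some end_pos)), st.2)
      else st
    else st
  else if (PySem.Str.isIn "but got:" line ∨ PySem.Str.isIn "actual:" line) ∧ PySem.Str.isIn "\"(function(scope)" line then
    let start := PySem.Str.find line "\"(function(scope)"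
    if start ≠ -1 then
      let js_content := PySem.Str.slice line (some (start + 1)) none
      let end_pos := find_closing_quote js_content
      if end_pos ≠ -1 then (st.1, some (PySem.Str.slice js_content none (some end_pos)))
      else st
    else st
  else st

-- text.split('\n'): sep is the non-empty "\n", so split? is always some
def extract_js_from_failure (text : String) : Option String × Option String :=
  ((PySem.Str.split? text "\n").getD []).foldl stepA (none, none)

-- ===== PORT B =====

-- the 'for ch in …' loop of _payload; Python's prev is a string ('' initially, then the last char)
def scanB : String → List Char → List Char → Option String
  | _, _, [] => none
  | prev, out, c :: tl =>
      if c = '"' ∧ prev ≠ "\\" then some (String.ofList out)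
      else scanB (String.ofList [c]) (out ++ [c]) tl

def payloadB (line : String) : Option String :=
  let start := PySem.Str.find line "\"(function(scope)"
  if start = -1 then none
  else scanB "" [] (PySem.Str.slice line (some (start + 1)) none).toList

def loopB : List String → Option String × Option String → Option String × Option String
  | [], st => st
  | line :: rest, (e, a) =>
      if e.isSome ∧ a.isSome then (e, a)
      else
        let isExp := PySem.Str.isIn "expected:" line
        if ¬ (isExp ∨ PySem.Str.isIn "but got:" line ∨ PySem.Str.isIn "actual:" line) then
          loopB rest (e, a)
        else
          match payloadB line with
          | none => loopB rest (e, a)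
          | some p =>
              if isExp then loopB rest ((if e.isSome then e else some p), a)
              else loopB rest (e, (if a.isSome then a else some p))

def extract_js_from_failure_alt (text : String) : Option String × Option String :=
  loopB ((PySem.Str.split? text "\n").getD []).reverse (none, none)

-- ===== PRECONDITION & SPEC =====
def Spec_extract_js_from_failure (text : String) (out : Option String × Option String) : Prop := out = extract_js_from_failure_alt text
instance (text : String) (out : Option String × Option String) : Decidable (Spec_extract_js_from_failure text out) := by unfold Spec_extract_js_from_failure; infer_instance

-- ===== CLAIM (what is proved, stated in full; the proofs are below) =====
def Claim_equal_extract_js_from_failure : Prop := ∀ (text : String), Dom_extract_js_from_failure text → Spec_extract_js_from_failure text (extract_js_from_failure text)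

-- ===== LEMMAS AND PROOFS =====

-- proof-only notions: the two effective line conditions of A's if/elif, the value a line
-- contributes, and 'first match from the front of ls, else x'
def condE (line : String) : Bool :=
  PySem.Str.isIn "expected:" line && PySem.Str.isIn "\"(function(scope)" line
def condA (line : String) : Bool :=
  !condE line && (PySem.Str.isIn "but got:" line || PySem.Str.isIn "actual:" line) && PySem.Str.isIn "\"(function(scope)" line

def valOf (c : String → Bool) (line : String) : Option String :=
  if c line then payloadB line else none

def runFirst (c : String → Bool) : List String → Option String → Option String
  | [], x => x
  | l :: tl, x => match valOf c l with
      | some p => some p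
      | none => runFirst c tl x

theorem condE_iff (l : String) :
    condE l = true ↔ (PySem.Str.isIn "expected:" l = true ∧ PySem.Str.isIn "\"(function(scope)" l = true) := by
  simp [condE]

theorem condA_iff (l : String) :
    condA l = true ↔ (¬ condE l = true ∧ (PySem.Str.isIn "but got:" l = true ∨ PySem.Str.isIn "actual:" l = true) ∧ PySem.Str.isIn "\"(function(scope)" l = true) := by
  simp [condA, and_assoc]

theorem ofList_single_eq_backslash (c : Char) : (String.ofList [c] = "\\") ↔ c = '\\' := by
  constructor
  · intro h; have := congrArg String.toList h; simpa using this
  · rintro rfl; rfl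

theorem scanB_eq_fcq (cs : List Char) :
    ∀ i, i ≤ cs.length →
      scanB (if i = 0 then "" else String.ofList [cs[i-1]!]) (cs.take i) (cs.drop i) =
        (if fcqAux cs i ≠ -1 then some (String.ofList (cs.take (fcqAux cs i).toNat)) else none) := by
  suffices H : ∀ n i, cs.length - i = n → i ≤ cs.length →
      scanB (if i = 0 then "" else String.ofList [cs[i-1]!]) (cs.take i) (cs.drop i) =
        (if fcqAux cs i ≠ -1 then some (String.ofList (cs.take (fcqAux cs i).toNat)) else none) by
    intro i hi; exact H _ i rfl hi
  intro n
  induction n with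
  | zero =>
      intro i hn hi
      have hlen : i = cs.length := by omega
      subst hlen
      rw [List.drop_length]
      unfold fcqAux
      simp [scanB]
  | succ n ih =>
      intro i hn hi
      have h : i < cs.length := by omega
      rw [List.drop_eq_getElem_cons h]
      unfold fcqAux
      rw [dif_pos h]
      have hprev : ((if i = 0 then "" else String.ofList [cs[i-1]!]) ≠ "\\") ↔ (i = 0 ∨ cs[i-1]! ≠ '\\') := by
        by_cases h0 : i = 0
        · simp [h0]
        · simp [h0, ofList_single_eq_backslash]
      by_cases hc : cs[i] = '"' ∧ (i = 0 ∨ cs[i-1]! ≠ '\\')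
      · rw [if_pos hc]
        have : cs[i] = '"' ∧ (if i = 0 then "" else String.ofList [cs[i-1]!]) ≠ "\\" :=
          ⟨hc.1, hprev.mpr hc.2⟩
        simp only [scanB, if_pos this]
        simp
      · rw [if_neg hc]
        have hcond : ¬ (cs[i] = '"' ∧ (if i = 0 then "" else String.ofList [cs[i-1]!]) ≠ "\\") := by
          intro ⟨h1, h2⟩; exact hc ⟨h1, hprev.mp h2⟩
        simp only [scanB, if_neg hcond]
        have h1 : cs.take i ++ [cs[i]] = cs.take (i+1) := List.take_append_getElem h
        have h2 : String.ofList [cs[i]] = (if i + 1 = 0 then "" else String.ofList [cs[(i+1)-1]!]) := by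
          simp [getElem!_pos cs i h]
        rw [h1, h2]
        exact ih (i+1) (by omega) (by omega)

theorem fcqAux_cases (cs : List Char) (i : Nat) : fcqAux cs i = -1 ∨ 0 ≤ fcqAux cs i := by
  fun_induction fcqAux with
  | case1 => right; positivity
  | case2 => assumption
  | case3 => left; rfl

theorem payloadB_char (line : String)
    (hs : PySem.Str.find line "\"(function(scope)" ≠ -1) :
    payloadB line =
      (if find_closing_quote (PySem.Str.slice line (some (PySem.Str.find line "\"(function(scope)" + 1)) none) ≠ -1
       then some (PySem.Str.slice (PySem.Str.slice line (some (PySem.Str.find line "\"(function(scope)" + 1)) none) none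
              (some (find_closing_quote (PySem.Str.slice line (some (PySem.Str.find line "\"(function(scope)" + 1)) none))))
       else none) := by
  unfold payloadB
  rw [if_neg hs]
  set js := PySem.Str.slice line (some (PySem.Str.find line "\"(function(scope)" + 1)) none with hjs
  have h0 := scanB_eq_fcq js.toList 0 (by omega)
  rw [if_pos rfl, List.take_zero, List.drop_zero] at h0
  rw [h0]
  unfold find_closing_quote
  by_cases he : fcqAux js.toList 0 = -1
  · simp [he]
  · rw [if_pos he, if_pos he]
    have hpos : 0 ≤ fcqAux js.toList 0 := (fcqAux_cases js.toList 0).resolve_left he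
    congr 1
    apply String.toList_inj.mp
    simp [PySem.Str.slice, PySem.Chars.slice_eq_listSlice, PySem.List.slice_to _ hpos]

theorem stepA_eq (st : Option String × Option String) (l : String) :
    stepA st l = ((valOf condE l).or st.1, (valOf condA l).or st.2) := by
  have hM : ∀ (h : PySem.Str.isIn "\"(function(scope)" l = true),
      PySem.Str.find l "\"(function(scope)" ≠ -1 := by
    intro h
    rw [PySem.Str.find_ne_neg_one_iff]
    exact (PySem.Str.isIn_iff_infix _ l).mp h
  by_cases hE : condE l
  · obtain ⟨h1, h2⟩ := (condE_iff l).mp hE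
    have hf := hM h2
    have hA : ¬ (condA l = true) := by simp [condA, hE]
    simp only [stepA, valOf, if_pos (And.intro h1 h2), if_pos hE,
      if_neg hA, ne_eq, hf, not_false_eq_true, if_true, payloadB_char l hf]
    by_cases he : find_closing_quote (PySem.Str.slice l (some (PySem.Str.find l "\"(function(scope)" + 1)) none) = -1
    · rw [if_neg (not_not_intro he), if_neg (not_not_intro he)]
      simp
    · rw [if_pos he, if_pos he]
      simp
  · by_cases hA : condA l
    · obtain ⟨hE', h1, h2⟩ := (condA_iff l).mp hA
      have hf := hM h2
      have hE'' : ¬ (PySem.Str.isIn "expected:" l = true ∧ PySem.Str.isIn "\"(function(scope)" l = true) :=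
        fun hc => hE' ((condE_iff l).mpr hc)
      simp only [stepA, valOf, if_neg hE'', if_neg hE', if_pos (And.intro h1 h2),
        if_pos hA, ne_eq, hf, not_false_eq_true, if_true,
        payloadB_char l hf]
      by_cases he : find_closing_quote (PySem.Str.slice l (some (PySem.Str.find l "\"(function(scope)" + 1)) none) = -1
      · rw [if_neg (not_not_intro he), if_neg (not_not_intro he)]
        simp
      · rw [if_pos he, if_pos he]
        simp
    · have hE'' : ¬ (PySem.Str.isIn "expected:" l = true ∧ PySem.Str.isIn "\"(function(scope)" l = true) :=
        fun hc => hE ((condE_iff l).mpr hc)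
      have hA'' : ¬ ((PySem.Str.isIn "but got:" l = true ∨ PySem.Str.isIn "actual:" l = true) ∧ PySem.Str.isIn "\"(function(scope)" l = true) := by
        intro h; exact hA ((condA_iff l).mpr ⟨hE, h.1, h.2⟩)
      simp only [stepA, valOf, if_neg hE'', if_neg hA'', if_neg hE, if_neg hA]
      simp

theorem runFirst_singleton (c : String → Bool) (l : String) (x : Option String) :
    runFirst c [l] x = (valOf c l).or x := by
  simp only [runFirst]
  cases h : valOf c l <;> simp [Option.or]

theorem runFirst_append (c : String → Bool) (as bs : List String) (x : Option String) :
    runFirst c (as ++ bs) x = runFirst c as (runFirst c bs x) := by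
  induction as with
  | nil => rfl
  | cons l tl ih =>
      simp only [List.cons_append, runFirst]
      cases valOf c l <;> simp [ih]

theorem foldA_eq (ls : List String) (st : Option String × Option String) :
    ls.foldl stepA st = (runFirst condE ls.reverse st.1, runFirst condA ls.reverse st.2) := by
  induction ls generalizing st with
  | nil => rfl
  | cons l tl ih =>
      rw [List.foldl_cons, ih, List.reverse_cons, runFirst_append, runFirst_append,
        runFirst_singleton condE, runFirst_singleton condA, stepA_eq]

theorem loopB_eq (ls : List String) (e a : Option String) :
    loopB ls (e, a) = (e.or (runFirst condE ls none), a.or (runFirst condA ls none)) := by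
  induction ls generalizing e a with
  | nil => simp [loopB, runFirst]
  | cons l tl ih =>
      simp only [loopB]
      by_cases hsome : e.isSome ∧ a.isSome
      · rw [if_pos hsome]
        obtain ⟨ev, rfl⟩ := Option.isSome_iff_exists.mp hsome.1
        obtain ⟨av, rfl⟩ := Option.isSome_iff_exists.mp hsome.2
        simp
      · rw [if_neg hsome]
        by_cases hkw : PySem.Str.isIn "expected:" l = true ∨ PySem.Str.isIn "but got:" l = true ∨ PySem.Str.isIn "actual:" l = true
        · rw [if_neg (not_not_intro hkw)]
          cases hp : payloadB l with
          | none =>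
              have hvE : valOf condE l = none := by
                unfold valOf; split <;> simp [hp]
              have hvA : valOf condA l = none := by
                unfold valOf; split <;> simp [hp]
              simp only [ih, runFirst, hvE, hvA]
          | some p =>
              have hmark : PySem.Str.isIn "\"(function(scope)" l = true := by
                by_contra hm
                have hfind : PySem.Str.find l "\"(function(scope)" = -1 := by
                  rw [PySem.Str.find_eq_neg_one_iff]
                  intro hinf
                  exact hm ((PySem.Str.isIn_iff_infix _ l).mpr hinf)
                unfold payloadB at hp
                rw [if_pos hfind] at hp
                cases hp
              by_cases hx : PySem.Str.isIn "expected:" l = true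
              · have hE : condE l = true := (condE_iff l).mpr ⟨hx, hmark⟩
                have hA : ¬ (condA l = true) := by simp [condA, hE]
                have hvE : valOf condE l = some p := by unfold valOf; rw [if_pos hE, hp]
                have hvA : valOf condA l = none := by unfold valOf; rw [if_neg hA]
                simp only [if_pos hx, ih]
                simp only [runFirst, hvE, hvA]
                cases e <;> simp
              · have hE : ¬ (condE l = true) := fun h => hx ((condE_iff l).mp h).1
                have hA : condA l = true := (condA_iff l).mpr ⟨hE, by tauto, hmark⟩
                have hvE : valOf condE l = none := by unfold valOf; rw [if_neg hE]
                have hvA : valOf condA l = some p := by unfold valOf; rw [if_pos hA, hp]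
                simp only [if_neg hx, ih]
                simp only [runFirst, hvE, hvA]
                cases a <;> simp
        · rw [if_pos (by tauto)]
          have hkw' := hkw
          push Not at hkw'
          have hvE : valOf condE l = none := by
            unfold valOf; rw [if_neg (fun h => hkw'.1 ((condE_iff l).mp h).1)]
          have hvA : valOf condA l = none := by
            unfold valOf
            rw [if_neg (fun h => by rcases ((condA_iff l).mp h).2.1 with h' | h'
                                    exacts [hkw'.2.1 h', hkw'.2.2 h'])]
          simp only [ih, runFirst, hvE, hvA]


-- ===== VERDICT (by name: the statement is the Claim_ definition above) =====
theorem extract_js_from_failure_spec : Claim_equal_extract_js_from_failure := by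
  intro text _
  unfold Spec_extract_js_from_failure extract_js_from_failure extract_js_from_failure_alt
  rw [foldA_eq, loopB_eq]
  simp
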